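-- pv_equiv track=rewrite | github.com/citizen-stig/advent-of-code-2018 | day2/s1.py | count_line
-- ===== SOURCE A (Python) =====
-- from collections import defaultdict
--
-- def count_line(line):
--     letters_distribution = defaultdict(int)
--     for letter in line:
--         letters_distribution[letter] += 1
--
--     uniq_values = set(letters_distribution.values())
--     has_2 = 1 if 2 in uniq_values else 0
--     has_3 = 1 if 3 in uniq_values else 0
--
--     return has_2, has_3
-- ===== SOURCE B (Python) =====
-- def count_line(line):
--     s = sorted(line)
--     has_2 = False
--     has_3 = False
--     i = 0
--     n = len(s)
--     while i < n:
--         j = i + 1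
--         while j < n and s[j] == s[i]:
--             j += 1
--         run = j - i
--         if run == 2:
--             has_2 = True
--         elif run == 3:
--             has_3 = True
--         i = j
--     return (1 if has_2 else 0, 1 if has_3 else 0)
-- ===== Notes on version B (the rewrite author's own statement) =====
-- stated objective: alternative
-- what changed: B replaces A's hash-table frequency count plus set-of-values membership test with sorting the characters and scanning the sorted list once, measuring the length of each run of equal letters.
import Mathlib
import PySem

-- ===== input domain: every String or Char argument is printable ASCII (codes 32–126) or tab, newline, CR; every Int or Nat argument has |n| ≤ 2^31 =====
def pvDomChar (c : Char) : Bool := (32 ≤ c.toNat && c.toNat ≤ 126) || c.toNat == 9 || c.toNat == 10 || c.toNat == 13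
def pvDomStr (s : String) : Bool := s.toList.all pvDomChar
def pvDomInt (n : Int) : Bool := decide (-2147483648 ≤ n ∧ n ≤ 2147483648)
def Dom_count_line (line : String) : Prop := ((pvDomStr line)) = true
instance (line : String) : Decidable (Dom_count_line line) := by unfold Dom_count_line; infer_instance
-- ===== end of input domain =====

-- B replaces A's frequency table plus set-of-values test with sort-then-run-length scan; same result on every string.
-- ===== PORT A =====
def count_line (line : String) : Int × Int :=
  let d := line.toList.foldl (fun d c => d.modify c 0 (· + 1)) PySem.Dict.empty
  let uniq : PySem.Set Int := PySem.Set.ofList (PySem.Dict.values d)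
  let has2 : Int := if PySem.Set.contains uniq 2 then 1 else 0
  let has3 : Int := if PySem.Set.contains uniq 3 then 1 else 0
  (has2, has3)

-- ===== PORT B =====
-- the outer while loop of Source B: each step consumes one run of equal characters
-- (the inner 'while' that advances j computes the takeWhile length; 'i = j' is the dropWhile)
def scanRuns : List Char → Bool → Bool → Bool × Bool
  | [], h2, h3 => (h2, h3)
  | c :: rest, h2, h3 =>
      let run := (rest.takeWhile (fun x => x == c)).length + 1
      let h2' := if run = 2 then true else h2
      let h3' := if run = 3 then true else h3
      scanRuns (rest.dropWhile (fun x => x == c)) h2' h3'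
termination_by l => l.length
decreasing_by
  have := List.length_dropWhile_le (p := fun x => x == c) (l := rest)
  simp; omega

def count_line_alt (line : String) : Int × Int :=
  let s := PySem.List.sorted line.toList (fun x => x) false
  let r := scanRuns s false false
  ((if r.1 then 1 else 0), (if r.2 then 1 else 0))

-- ===== PRECONDITION & SPEC =====
def Spec_count_line (line : String) (out : Int × Int) : Prop := out = count_line_alt line
instance (line : String) (out : Int × Int) : Decidable (Spec_count_line line out) := by unfold Spec_count_line; infer_instance

-- ===== CLAIM (what is proved, stated in full; the proofs are below) =====
def Claim_equal_count_line : Prop := ∀ (line : String), Dom_count_line line → Spec_count_line line (count_line line)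

-- ===== LEMMAS AND PROOFS =====

-- A side: the values of the counter dict are exactly the counts of the distinct characters
theorem mem_values_counter (xs : List Char) (v : Int) :
    v ∈ (PySem.Dict.counter xs).values ↔ ∃ k ∈ xs, (xs.count k : Int) = v := by
  have h : (PySem.Dict.counter xs).values = (PySem.Dict.counter xs).items.map Prod.snd := by
    simp [PySem.Dict.values]
  rw [h, PySem.Dict.items_counter]
  simp [PySem.Set.mem_ofList]

theorem contains_values_counter (xs : List Char) (n : Nat) :
    PySem.Set.contains (PySem.Set.ofList ((PySem.Dict.counter xs).values)) (n : Int)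
      = xs.any (fun c => xs.count c == n) := by
  rw [Bool.eq_iff_iff]
  simp [PySem.Set.contains, PySem.Set.mem_ofList, mem_values_counter, List.any_eq_true]

theorem count_line_a_eq (line : String) :
    count_line line = ((if line.toList.any (fun c => line.toList.count c == 2) then 1 else 0),
                       (if line.toList.any (fun c => line.toList.count c == 3) then 1 else 0)) := by
  unfold count_line
  dsimp only
  rw [← PySem.Dict.counter_eq_foldl]
  rw [show ((2:Int)) = ((2:Nat):Int) from rfl, show ((3:Int)) = ((3:Nat):Int) from rfl]
  rw [contains_values_counter, contains_values_counter]

-- B side: on a ≤-sorted list, runs of equal characters carry exactly the counts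
theorem not_mem_dropWhile (c : Char) (rest : List Char) (hr : rest.Pairwise (· ≤ ·))
    (hc : ∀ x ∈ rest, c ≤ x) : c ∉ rest.dropWhile (fun x => x == c) := by
  cases hd : rest.dropWhile (fun x => x == c) with
  | nil => simp
  | cons d ds =>
    have hdc : ¬ (d == c) = true := by
      have := List.head?_dropWhile_not (p := fun x => x == c) (l := rest)
      rw [hd] at this; simpa using this
    have hdc' : d ≠ c := fun h => hdc (beq_iff_eq.mpr h)
    have hsub : (d :: ds).Sublist rest := hd ▸ List.dropWhile_sublist _
    have hdmem : d ∈ rest := hsub.mem (by simp)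
    have hcd : c < d := lt_of_le_of_ne (hc d hdmem) (Ne.symm hdc')
    have hpw : (d :: ds).Pairwise (· ≤ ·) := hr.sublist hsub
    intro hmem
    rcases List.mem_cons.mp hmem with h | hmem'
    · exact hdc' h.symm
    · have : d ≤ c := (List.pairwise_cons.mp hpw).1 c hmem'
      exact absurd (lt_of_lt_of_le hcd this) (lt_irrefl c)

theorem count_head_run (c : Char) (rest : List Char) (hr : rest.Pairwise (· ≤ ·))
    (hc : ∀ x ∈ rest, c ≤ x) :
    rest.count c = (rest.takeWhile (fun x => x == c)).length := by
  have hsplit := List.takeWhile_append_dropWhile (p := fun x => x == c) (l := rest)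
  have h1 : (rest.takeWhile (fun x => x == c)).count c = (rest.takeWhile (fun x => x == c)).length := by
    apply List.count_eq_length.mpr
    intro a ha
    exact (eq_of_beq (List.mem_takeWhile_imp (p := fun x => x == c) ha)).symm
  have h2 : (rest.dropWhile (fun x => x == c)).count c = 0 :=
    List.count_eq_zero.mpr (not_mem_dropWhile c rest hr hc)
  calc rest.count c = ((rest.takeWhile (fun x => x == c)) ++ (rest.dropWhile (fun x => x == c))).count c := by rw [hsplit]
    _ = _ := by rw [List.count_append, h1, h2]; omega

theorem count_tail (c v : Char) (rest : List Char) (hv : v ≠ c) :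
    (c :: rest).count v = (rest.dropWhile (fun x => x == c)).count v := by
  have hsplit := List.takeWhile_append_dropWhile (p := fun x => x == c) (l := rest)
  have h1 : (rest.takeWhile (fun x => x == c)).count v = 0 := by
    apply List.count_eq_zero.mpr
    intro hmem
    exact hv (eq_of_beq (List.mem_takeWhile_imp (p := fun x => x == c) hmem))
  calc (c :: rest).count v = rest.count v := List.count_cons_of_ne hv.symm
    _ = ((rest.takeWhile (fun x => x == c)) ++ (rest.dropWhile (fun x => x == c))).count v := by rw [hsplit]
    _ = _ := by rw [List.count_append, h1]; omega

theorem anyCount_cons (c : Char) (rest : List Char) (hr : rest.Pairwise (· ≤ ·))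
    (hc : ∀ x ∈ rest, c ≤ x) (n : Nat) :
    (c :: rest).any (fun v => (c :: rest).count v == n)
      = (decide ((rest.takeWhile (fun x => x == c)).length + 1 = n)
         || (rest.dropWhile (fun x => x == c)).any
              (fun v => (rest.dropWhile (fun x => x == c)).count v == n)) := by
  have hrun : (c :: rest).count c = (rest.takeWhile (fun x => x == c)).length + 1 := by
    rw [List.count_cons_self, count_head_run c rest hr hc]
  rw [Bool.eq_iff_iff]
  simp only [List.any_eq_true, Bool.or_eq_true, decide_eq_true_eq, beq_iff_eq]
  constructor
  · rintro ⟨v, hvmem, hvcount⟩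
    by_cases hvc : v = c
    · subst hvc; left; omega
    · right
      have hvrest : v ∈ rest := by
        rcases List.mem_cons.mp hvmem with h | h
        · exact absurd h hvc
        · exact h
      have hvd : v ∈ rest.dropWhile (fun x => x == c) := by
        have hs := List.takeWhile_append_dropWhile (p := fun x => x == c) (l := rest)
        rw [← hs] at hvrest
        rcases List.mem_append.mp hvrest with h | h
        · exact absurd (eq_of_beq (List.mem_takeWhile_imp (p := fun x => x == c) h)) hvc
        · exact h
      exact ⟨v, hvd, by rw [← count_tail c v rest hvc]; exact hvcount⟩
  · rintro (h | ⟨v, hvmem, hvcount⟩)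
    · exact ⟨c, List.mem_cons_self, by omega⟩
    · have hvrest : v ∈ rest := (List.dropWhile_sublist _).mem hvmem
      have hvc : v ≠ c := by
        intro h; subst h; exact not_mem_dropWhile v rest hr hc hvmem
      exact ⟨v, List.mem_cons_of_mem _ hvrest, by rw [count_tail c v rest hvc]; exact hvcount⟩

theorem scanRuns_eq_aux (n : Nat) : ∀ (l : List Char), l.length ≤ n → l.Pairwise (· ≤ ·) → ∀ (h2 h3 : Bool),
    scanRuns l h2 h3 = (h2 || l.any (fun c => l.count c == 2), h3 || l.any (fun c => l.count c == 3)) := by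
  induction n with
  | zero =>
    intro l hl _ h2 h3
    have : l = [] := List.eq_nil_of_length_eq_zero (by omega)
    subst this; simp [scanRuns]
  | succ n ih =>
    intro l hl hp h2 h3
    cases l with
    | nil => simp [scanRuns]
    | cons c rest =>
      rw [scanRuns]
      have hc : ∀ x ∈ rest, c ≤ x := (List.pairwise_cons.mp hp).1
      have hr : rest.Pairwise (· ≤ ·) := (List.pairwise_cons.mp hp).2
      have hlen : (rest.dropWhile (fun x => x == c)).length ≤ n := by
        have := List.length_dropWhile_le (p := fun x => x == c) (l := rest)
        simp at hl; omega
      have hpd : (rest.dropWhile (fun x => x == c)).Pairwise (· ≤ ·) :=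
        hr.sublist (List.dropWhile_sublist _)
      rw [ih _ hlen hpd]
      rw [Prod.mk.injEq]
      constructor
      · rw [anyCount_cons c rest hr hc 2]
        by_cases h : (rest.takeWhile (fun x => x == c)).length + 1 = 2 <;> cases h2 <;> simp [h]
      · rw [anyCount_cons c rest hr hc 3]
        by_cases h : (rest.takeWhile (fun x => x == c)).length + 1 = 3 <;> cases h3 <;> simp [h]

theorem any_count_perm (s xs : List Char) (hperm : s.Perm xs) (n : Nat) :
    s.any (fun c => s.count c == n) = xs.any (fun c => xs.count c == n) := by
  rw [Bool.eq_iff_iff]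
  simp only [List.any_eq_true, beq_iff_eq]
  constructor
  · rintro ⟨v, hv, hcnt⟩
    exact ⟨v, hperm.mem_iff.mp hv, by rw [← hperm.count_eq]; exact hcnt⟩
  · rintro ⟨v, hv, hcnt⟩
    exact ⟨v, hperm.mem_iff.mpr hv, by rw [hperm.count_eq]; exact hcnt⟩

theorem count_line_b_eq (line : String) :
    count_line_alt line = ((if line.toList.any (fun c => line.toList.count c == 2) then 1 else 0),
                       (if line.toList.any (fun c => line.toList.count c == 3) then 1 else 0)) := by
  unfold count_line_alt
  dsimp only
  have hp : (PySem.List.sorted line.toList (fun x => x) false).Pairwise (· ≤ ·) :=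
    PySem.List.sorted_pairwise line.toList (fun x => x)
  have hperm : (PySem.List.sorted line.toList (fun x => x) false).Perm line.toList :=
    PySem.List.sorted_perm line.toList (fun x => x) false
  rw [scanRuns_eq_aux (PySem.List.sorted line.toList (fun x => x) false).length _ le_rfl hp]
  simp only [Bool.false_or]
  rw [any_count_perm _ _ hperm 2, any_count_perm _ _ hperm 3]

-- ===== VERDICT (by name: the statement is the Claim_ definition above) =====
theorem count_line_spec : Claim_equal_count_line := by
  intro line _
  unfold Spec_count_line
  rw [count_line_a_eq, count_line_b_eq]
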